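-- pv_equiv track=rewrite | github.com/Dan-Vizor/coderbyteScripts | KaprekarsConstant/KaprekarsConstant.py | inputs
-- ===== SOURCE A (Python) =====
-- def largest(List):
--     Max = 0
--     loop = 0
--     out = 0
--     for current in List:
--         if current > Max:
--             Max = current
--             out = loop
--         loop += 1
--     return out + 1
--
-- def smallest(List):
--     Max = 999999999999999
--     loop = 0
--     out = 0
--     for current in List:
--         if current < Max:
--             Max = current
--             out = loop
--         loop += 1
--     return out + 1
--
-- def inputs(num):
--     List = []
--     for each in str(num):
--         List += [int(each)]
--
--     large = ""
--     tmpList = List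
--     while len(large) < 4:
--         L = largest(tmpList)
--         large += str(tmpList[L -1])
--         del tmpList[L -1]
--
--     List = []
--     for each in str(num):
--         List += [int(each)]
--
--     small = ""
--     tmpList = List
--     while len(small) < 4:
--         L = smallest(tmpList)
--         small += str(tmpList[L -1])
--         del tmpList[L -1]
--
--     return large, small
-- ===== SOURCE B (Python) =====
-- def inputs(num):
--     digits = [int(c) for c in str(num)]
--     asc = sorted(digits)
--     desc = sorted(digits, reverse=True)
--     large = ""
--     i = 0
--     while len(large) < 4:
--         large += str(desc[i])
--         i += 1
--     small = ""
--     i = 0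
--     while len(small) < 4:
--         small += str(asc[i])
--         i += 1
--     return large, small
-- ===== Notes on version B (the rewrite author's own statement) =====
-- stated objective: simpler
-- what changed: Replaces the two destructive selection loops (repeated scan for the first extremum plus in-place delete) by sorting the digit list once ascending and once descending and concatenating the first four digits of each sorted list.
import Mathlib
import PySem

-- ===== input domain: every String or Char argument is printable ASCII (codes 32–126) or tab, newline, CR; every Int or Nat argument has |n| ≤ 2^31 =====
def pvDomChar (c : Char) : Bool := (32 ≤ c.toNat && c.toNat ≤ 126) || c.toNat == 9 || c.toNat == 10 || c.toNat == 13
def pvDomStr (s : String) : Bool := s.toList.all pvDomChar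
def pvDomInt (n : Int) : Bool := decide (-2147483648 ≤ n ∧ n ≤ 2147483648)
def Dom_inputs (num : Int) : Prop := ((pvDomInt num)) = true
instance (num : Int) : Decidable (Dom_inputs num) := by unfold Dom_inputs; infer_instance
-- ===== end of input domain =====

-- B replaces A's destructive first-extremum selection loops by sorting the digits once each way
-- and joining the first four (objective: simpler). Return-value equivalence only; A mutates only
-- its own local lists.

-- ===== PORT A =====
-- int(each): PySem.Int.ofChars? is none (ValueError) exactly where Python's int(c) raises —
-- inside Pre_ every char of str(num) is a decimal digit, so the .getD 0 default is never reached.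
def pyIntChar (c : Char) : Int := (PySem.Int.ofChars? [c]).getD 0

-- List = []; for each in str(num): List += [int(each)]
def digitsOf (num : Int) : List Int :=
  (PySem.Int.toChars num).foldl (fun l each => l ++ [pyIntChar each]) []

-- loop body of largest(List): state (Max, loop, out)
def stepMax (st : Int × Int × Int) (current : Int) : Int × Int × Int :=
  let Max := st.1; let loop := st.2.1; let out := st.2.2
  let (Max, out) := if Max < current then (current, loop) else (Max, out)
  (Max, loop + 1, out)

def largestA (L : List Int) : Int :=
  let s := L.foldl stepMax (0, 0, 0)
  s.2.2 + 1

-- loop body of smallest(List)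
def stepMin (st : Int × Int × Int) (current : Int) : Int × Int × Int :=
  let Max := st.1; let loop := st.2.1; let out := st.2.2
  let (Max, out) := if current < Max then (current, loop) else (Max, out)
  (Max, loop + 1, out)

def smallestA (L : List Int) : Int :=
  let s := L.foldl stepMin (999999999999999, 0, 0)
  s.2.2 + 1

-- while len(large) < 4: L = largest(tmpList); large += str(tmpList[L-1]); del tmpList[L-1]
-- pop? combines the lookup tmpList[L-1] with del tmpList[L-1] (same index); it is none exactly
-- where Python's indexing raises IndexError (excluded by Pre_), and the loop stops there.
def loopLargeA (large : List Char) (tmpList : List Int) : List Char :=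
  if large.length < 4 then
    match h : PySem.List.pop? tmpList (largestA tmpList - 1) with
    | some (d, rest) => loopLargeA (large ++ PySem.Int.toChars d) rest
    | none => large
  else large
termination_by tmpList.length
decreasing_by
  have := PySem.List.length_of_pop?_eq_some tmpList h; simp at this; omega

def loopSmallA (small : List Char) (tmpList : List Int) : List Char :=
  if small.length < 4 then
    match h : PySem.List.pop? tmpList (smallestA tmpList - 1) with
    | some (d, rest) => loopSmallA (small ++ PySem.Int.toChars d) rest
    | none => small
  else small
termination_by tmpList.length
decreasing_by
  have := PySem.List.length_of_pop?_eq_some tmpList h; simp at this; omega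

def inputs (num : Int) : String × String :=
  let L1 := digitsOf num
  let large := loopLargeA [] L1
  let L2 := digitsOf num
  let small := loopSmallA [] L2
  (String.ofList large, String.ofList small)

-- ===== PORT B =====
-- str(n) is never empty, so each while-iteration of B's build loop lengthens the string
theorem toChars_len_pos (d : Int) : 0 < (PySem.Int.toChars d).length := by
  have hcore : ∀ (f n : Nat) (acc : List Char),
      acc.length + 1 ≤ (Nat.toDigitsCore 10 (f + 1) n acc).length := by
    intro f
    induction f with
    | zero =>
      intro n acc
      rw [Nat.toDigitsCore]
      split <;> simp [Nat.toDigitsCore]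
    | succ f ih =>
      intro n acc
      rw [Nat.toDigitsCore]
      split
      · simp
      · have := ih (n / 10) ((n % 10).digitChar :: acc)
        simp at this; omega
  simp only [PySem.Int.toChars]
  split
  · simp
  · have := hcore d.toNat d.toNat []
    rw [Nat.toDigits]; omega

-- while len(large) < 4: large += str(desc[i]); i += 1   (desc[i]: IndexError = none, outside Pre_)
def loopPickB (out : List Char) (src : List Int) (i : Int) : List Char :=
  if out.length < 4 then
    match PySem.List.pyGet? src i with
    | some d => loopPickB (out ++ PySem.Int.toChars d) src (i + 1)
    | none => out
  else out
termination_by 4 - out.length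
decreasing_by
  have := toChars_len_pos d; simp [List.length_append]; omega

def inputs_alt (num : Int) : String × String :=
  let digits := (PySem.Int.toChars num).map pyIntChar
  let asc := PySem.List.sorted digits (fun x => x) false
  let desc := PySem.List.sorted digits (fun x => x) true
  let large := loopPickB [] desc 0
  let small := loopPickB [] asc 0
  (String.ofList large, String.ofList small)

-- ===== PRECONDITION & SPEC =====
-- Pre_ excludes exactly the inputs where A raises: num < 0 (int('-') is a ValueError) and
-- 0 ≤ num < 1000 (fewer than 4 digits: the while loop empties the list and indexing raises
-- IndexError).  A returns normally exactly on num ≥ 1000.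
def Pre_inputs (num : Int) : Prop := 1000 ≤ num
instance (num : Int) : Decidable (Pre_inputs num) := by unfold Pre_inputs; infer_instance
def pvWitness_inputs : Int := (1203)

def Spec_inputs (num : Int) (out : String × String) : Prop := out = inputs_alt num
instance (num : Int) (out : String × String) : Decidable (Spec_inputs num out) := by unfold Spec_inputs; infer_instance

-- ===== CLAIM (what is proved, stated in full; the proofs are below) =====
def Claim_equal_inputs : Prop := ∀ (num : Int), Dom_inputs num → Pre_inputs num → Spec_inputs num (inputs num)

-- ===== LEMMAS AND PROOFS =====

-- str(num) for 0 < num is the base-10 digit string.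
theorem toDigitsCore_eq_digits (f : Nat) : ∀ (n : Nat) (acc : List Char), 0 < n → n < f →
    Nat.toDigitsCore 10 f n acc = ((Nat.digits 10 n).map Nat.digitChar).reverse ++ acc := by
  induction f with
  | zero => intro n acc h1 h2; omega
  | succ f ih =>
    intro n acc h1 h2
    rw [Nat.toDigitsCore]
    rw [Nat.digits_def' (by norm_num : 1 < 10) h1]
    by_cases hd : n / 10 = 0
    · simp [hd, Nat.digits_zero, List.map_cons]
    · have hlt : n / 10 < f := by
        have := Nat.div_lt_self h1 (by norm_num : 1 < 10); omega
      simp only [hd, if_false]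
      rw [ih (n / 10) _ (Nat.pos_of_ne_zero hd) hlt]
      simp

theorem toChars_eq_digits (m : Nat) (hm : 0 < m) :
    PySem.Int.toChars (m : Int) = ((Nat.digits 10 m).map Nat.digitChar).reverse := by
  simp only [PySem.Int.toChars]
  rw [if_neg (by omega), Int.toNat_natCast, Nat.toDigits,
    toDigitsCore_eq_digits (m + 1) m [] hm (by omega), List.append_nil]

theorem pyIntChar_digitChar (d : Nat) (hd : d < 10) : pyIntChar (Nat.digitChar d) = (d : Int) := by
  interval_cases d <;> decide

theorem toChars_len_one (d : Int) (h0 : 0 ≤ d) (h9 : d ≤ 9) : (PySem.Int.toChars d).length = 1 := by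
  interval_cases d <;> decide

-- the digit list both programs build
theorem digitsOf_eq_map (num : Int) : digitsOf num = (PySem.Int.toChars num).map pyIntChar := by
  rw [digitsOf, PySem.List.foldl_append_singleton_eq_map, List.nil_append]

theorem digits_facts (num : Int) (h : 1000 ≤ num) :
    (∀ x ∈ (PySem.Int.toChars num).map pyIntChar, 0 ≤ x ∧ x ≤ 9) ∧
    4 ≤ ((PySem.Int.toChars num).map pyIntChar).length := by
  obtain ⟨m, rfl⟩ : ∃ m : Nat, num = (m : Int) := ⟨num.toNat, (Int.toNat_of_nonneg (by omega)).symm⟩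
  have hm : 1000 ≤ m := by exact_mod_cast h
  rw [toChars_eq_digits m (by omega)]
  constructor
  · intro x hx
    simp only [List.mem_map, List.mem_reverse] at hx
    obtain ⟨c, ⟨d, hd, rfl⟩, rfl⟩ := hx
    have hd10 : d < 10 := Nat.digits_lt_base (by norm_num) hd
    rw [pyIntChar_digitChar d hd10]
    omega
  · simp only [List.length_map, List.length_reverse]
    by_contra hlen
    have h1 : m < 10 ^ (Nat.digits 10 m).length := Nat.lt_base_pow_length_digits (by norm_num)
    have h2 : (10:Nat) ^ (Nat.digits 10 m).length ≤ 10 ^ 3 :=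
      Nat.pow_le_pow_right (by norm_num) (by omega)
    norm_num at h2
    omega

-- the selection scans: the fold keeps (running extremum, position counter, index of the
-- first extremum so far)
theorem stepMax_eq (M l o a : Int) :
    stepMax (M, l, o) a = if M < a then (a, l + 1, l) else (M, l + 1, o) := by
  simp only [stepMax]; split <;> rfl

theorem stepMin_eq (M l o a : Int) :
    stepMin (M, l, o) a = if a < M then (a, l + 1, l) else (M, l + 1, o) := by
  simp only [stepMin]; split <;> rfl

theorem largest_fold (xs : List Int) : ∀ (M l o : Int),
    (xs.foldl stepMax (M, l, o)).2.1 = l + xs.length ∧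
    M ≤ (xs.foldl stepMax (M, l, o)).1 ∧
    (∀ x ∈ xs, x ≤ (xs.foldl stepMax (M, l, o)).1) ∧
    (((xs.foldl stepMax (M, l, o)).1 = M ∧ (xs.foldl stepMax (M, l, o)).2.2 = o) ∨
      ∃ i : Nat, ∃ hi : i < xs.length,
        (xs.foldl stepMax (M, l, o)).2.2 = l + i ∧ xs[i] = (xs.foldl stepMax (M, l, o)).1) := by
  induction xs with
  | nil => intro M l o; simp
  | cons a rest ih =>
    intro M l o
    simp only [List.foldl_cons, List.length_cons, stepMax_eq]
    by_cases hMa : M < a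
    · rw [if_pos hMa]
      obtain ⟨h1, h2, h3, h4⟩ := ih a (l + 1) l
      refine ⟨by omega, by omega, ?_, ?_⟩
      · intro x hx
        rcases List.mem_cons.mp hx with rfl | hx
        · exact h2
        · exact h3 x hx
      · rcases h4 with ⟨hM, ho⟩ | ⟨i, hi, ho, hx⟩
        · exact Or.inr ⟨0, by omega, by simpa using ho, by simpa using hM.symm⟩
        · exact Or.inr ⟨i + 1, by omega, by omega, by simpa using hx⟩
    · rw [if_neg hMa]
      obtain ⟨h1, h2, h3, h4⟩ := ih M (l + 1) o
      refine ⟨by omega, h2, ?_, ?_⟩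
      · intro x hx
        rcases List.mem_cons.mp hx with rfl | hx
        · omega
        · exact h3 x hx
      · rcases h4 with ⟨hM, ho⟩ | ⟨i, hi, ho, hx⟩
        · exact Or.inl ⟨hM, ho⟩
        · exact Or.inr ⟨i + 1, by omega, by omega, by simpa using hx⟩

theorem smallest_fold (xs : List Int) : ∀ (M l o : Int),
    (xs.foldl stepMin (M, l, o)).2.1 = l + xs.length ∧
    (xs.foldl stepMin (M, l, o)).1 ≤ M ∧
    (∀ x ∈ xs, (xs.foldl stepMin (M, l, o)).1 ≤ x) ∧
    (((xs.foldl stepMin (M, l, o)).1 = M ∧ (xs.foldl stepMin (M, l, o)).2.2 = o) ∨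
      ∃ i : Nat, ∃ hi : i < xs.length,
        (xs.foldl stepMin (M, l, o)).2.2 = l + i ∧ xs[i] = (xs.foldl stepMin (M, l, o)).1) := by
  induction xs with
  | nil => intro M l o; simp
  | cons a rest ih =>
    intro M l o
    simp only [List.foldl_cons, List.length_cons, stepMin_eq]
    by_cases hMa : a < M
    · rw [if_pos hMa]
      obtain ⟨h1, h2, h3, h4⟩ := ih a (l + 1) l
      refine ⟨by omega, by omega, ?_, ?_⟩
      · intro x hx
        rcases List.mem_cons.mp hx with rfl | hx
        · exact h2
        · exact h3 x hx
      · rcases h4 with ⟨hM, ho⟩ | ⟨i, hi, ho, hx⟩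
        · exact Or.inr ⟨0, by omega, by simpa using ho, by simpa using hM.symm⟩
        · exact Or.inr ⟨i + 1, by omega, by omega, by simpa using hx⟩
    · rw [if_neg hMa]
      obtain ⟨h1, h2, h3, h4⟩ := ih M (l + 1) o
      refine ⟨by omega, h2, ?_, ?_⟩
      · intro x hx
        rcases List.mem_cons.mp hx with rfl | hx
        · omega
        · exact h3 x hx
      · rcases h4 with ⟨hM, ho⟩ | ⟨i, hi, ho, hx⟩
        · exact Or.inl ⟨hM, ho⟩
        · exact Or.inr ⟨i + 1, by omega, by omega, by simpa using hx⟩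

theorem largestA_spec (xs : List Int) (hne : xs ≠ []) (hpos : ∀ x ∈ xs, 0 ≤ x) :
    ∃ i : Nat, ∃ hi : i < xs.length, largestA xs = (i : Int) + 1 ∧ ∀ x ∈ xs, x ≤ xs[i] := by
  obtain ⟨h1, h2, h3, h4⟩ := largest_fold xs 0 0 0
  have hlen : 0 < xs.length := List.length_pos_of_ne_nil hne
  rcases h4 with ⟨hM, ho⟩ | ⟨i, hi, ho, hx⟩
  · refine ⟨0, hlen, ?_, ?_⟩
    · simp only [largestA, ho]; norm_num
    · intro x hxm
      have hx0 : xs[0] ∈ xs := List.getElem_mem hlen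
      have := h3 x hxm
      have := h3 xs[0] hx0
      have := hpos xs[0] hx0
      omega
  · refine ⟨i, hi, ?_, ?_⟩
    · simp only [largestA, ho]; omega
    · intro x hxm; have := h3 x hxm; omega

theorem smallestA_spec (xs : List Int) (hne : xs ≠ []) (hb : ∀ x ∈ xs, x < 999999999999999) :
    ∃ i : Nat, ∃ hi : i < xs.length, smallestA xs = (i : Int) + 1 ∧ ∀ x ∈ xs, xs[i] ≤ x := by
  obtain ⟨h1, h2, h3, h4⟩ := smallest_fold xs 999999999999999 0 0
  have hlen : 0 < xs.length := List.length_pos_of_ne_nil hne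
  rcases h4 with ⟨hM, ho⟩ | ⟨i, hi, ho, hx⟩
  · exfalso
    have hx0 : xs[0] ∈ xs := List.getElem_mem hlen
    have := h3 xs[0] hx0
    have := hb xs[0] hx0
    omega
  · refine ⟨i, hi, ?_, ?_⟩
    · simp only [smallestA, ho]; omega
    · intro x hxm; have := h3 x hxm; omega

theorem perm_getElem_cons_eraseIdx {l : List Int} {i : Nat} (h : i < l.length) :
    (l[i] :: l.eraseIdx i).Perm l := by
  have h1 := List.perm_cons_erase (l.getElem_mem h)
  have h2 := List.erase_getElem h
  exact (h2.cons l[i]).symm.trans h1.symm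

-- removing an extremum from the front of the sort
theorem sorted_desc_cons (xs : List Int) (i : Nat) (hi : i < xs.length)
    (hmax : ∀ x ∈ xs, x ≤ xs[i]) :
    PySem.List.sorted xs (fun x => x) true
      = xs[i] :: PySem.List.sorted (xs.eraseIdx i) (fun x => x) true := by
  have hperm : (PySem.List.sorted xs (fun x => x) true).Perm
      (xs[i] :: PySem.List.sorted (xs.eraseIdx i) (fun x => x) true) := by
    refine (PySem.List.sorted_perm xs _ true).trans
      ((perm_getElem_cons_eraseIdx hi).symm.trans ?_)
    exact ((PySem.List.sorted_perm (xs.eraseIdx i) _ true).symm.cons xs[i])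
  refine List.Perm.eq_of_pairwise (le := fun a b => b ≤ a)
    (fun a b _ _ h1 h2 => le_antisymm h2 h1)
    (PySem.List.sorted_pairwise_rev xs _) ?_ hperm
  rw [List.pairwise_cons]
  refine ⟨fun b hb => ?_, PySem.List.sorted_pairwise_rev _ _⟩
  exact hmax b (List.mem_of_mem_eraseIdx ((PySem.List.mem_sorted _ _ _ _).mp hb))

theorem sorted_asc_cons (xs : List Int) (i : Nat) (hi : i < xs.length)
    (hmin : ∀ x ∈ xs, xs[i] ≤ x) :
    PySem.List.sorted xs (fun x => x) false
      = xs[i] :: PySem.List.sorted (xs.eraseIdx i) (fun x => x) false := by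
  have hperm : (PySem.List.sorted xs (fun x => x) false).Perm
      (xs[i] :: PySem.List.sorted (xs.eraseIdx i) (fun x => x) false) := by
    refine (PySem.List.sorted_perm xs _ false).trans
      ((perm_getElem_cons_eraseIdx hi).symm.trans ?_)
    exact ((PySem.List.sorted_perm (xs.eraseIdx i) _ false).symm.cons xs[i])
  refine List.Perm.eq_of_pairwise (le := fun a b => a ≤ b)
    (fun a b _ _ h1 h2 => le_antisymm h1 h2)
    (PySem.List.sorted_pairwise xs _) ?_ hperm
  rw [List.pairwise_cons]
  refine ⟨fun b hb => ?_, PySem.List.sorted_pairwise _ _⟩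
  exact hmin b (List.mem_of_mem_eraseIdx ((PySem.List.mem_sorted _ _ _ _).mp hb))

theorem loopLargeA_eq (n : Nat) : ∀ (xs : List Int) (acc : List Char),
    (∀ x ∈ xs, 0 ≤ x ∧ x ≤ 9) → n ≤ xs.length → acc.length + n = 4 →
    loopLargeA acc xs
      = acc ++ ((PySem.List.sorted xs (fun x => x) true).take n).flatMap PySem.Int.toChars := by
  induction n with
  | zero =>
    intro xs acc hd hn hacc
    rw [loopLargeA, if_neg (by omega)]
    simp
  | succ n ih =>
    intro xs acc hd hn hacc
    have hne : xs ≠ [] := by intro h; subst h; simp at hn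
    obtain ⟨i, hi, hL, hmax⟩ := largestA_spec xs hne (fun x hx => (hd x hx).1)
    have hdig := hd xs[i] (List.getElem_mem hi)
    have hpop : PySem.List.pop? xs (largestA xs - 1) = some (xs[i], xs.eraseIdx i) := by
      rw [hL, show (i : Int) + 1 - 1 = ((i : Nat) : Int) by omega,
        PySem.List.pop?_natCast xs i hi]
    rw [loopLargeA, if_pos (by omega)]
    split
    · rename_i d rest heq
      rw [hpop] at heq
      obtain ⟨rfl, rfl⟩ := Prod.mk.inj (Option.some.inj heq).symm
      rw [sorted_desc_cons xs i hi hmax, List.take_succ_cons, List.flatMap_cons]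
      rw [ih (xs.eraseIdx i) (acc ++ PySem.Int.toChars xs[i])
        (fun x hx => hd x (List.mem_of_mem_eraseIdx hx))
        (by have := List.length_eraseIdx_add_one hi; omega)
        (by rw [List.length_append, toChars_len_one xs[i] hdig.1 hdig.2]; omega)]
      rw [List.append_assoc]
    · rename_i heq
      rw [hpop] at heq
      exact absurd heq (by simp)

theorem loopSmallA_eq (n : Nat) : ∀ (xs : List Int) (acc : List Char),
    (∀ x ∈ xs, 0 ≤ x ∧ x ≤ 9) → n ≤ xs.length → acc.length + n = 4 →
    loopSmallA acc xs
      = acc ++ ((PySem.List.sorted xs (fun x => x) false).take n).flatMap PySem.Int.toChars := by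
  induction n with
  | zero =>
    intro xs acc hd hn hacc
    rw [loopSmallA, if_neg (by omega)]
    simp
  | succ n ih =>
    intro xs acc hd hn hacc
    have hne : xs ≠ [] := by intro h; subst h; simp at hn
    obtain ⟨i, hi, hL, hmin⟩ := smallestA_spec xs hne (fun x hx => by have := (hd x hx).2; omega)
    have hdig := hd xs[i] (List.getElem_mem hi)
    have hpop : PySem.List.pop? xs (smallestA xs - 1) = some (xs[i], xs.eraseIdx i) := by
      rw [hL, show (i : Int) + 1 - 1 = ((i : Nat) : Int) by omega,
        PySem.List.pop?_natCast xs i hi]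
    rw [loopSmallA, if_pos (by omega)]
    split
    · rename_i d rest heq
      rw [hpop] at heq
      obtain ⟨rfl, rfl⟩ := Prod.mk.inj (Option.some.inj heq).symm
      rw [sorted_asc_cons xs i hi hmin, List.take_succ_cons, List.flatMap_cons]
      rw [ih (xs.eraseIdx i) (acc ++ PySem.Int.toChars xs[i])
        (fun x hx => hd x (List.mem_of_mem_eraseIdx hx))
        (by have := List.length_eraseIdx_add_one hi; omega)
        (by rw [List.length_append, toChars_len_one xs[i] hdig.1 hdig.2]; omega)]
      rw [List.append_assoc]
    · rename_i heq
      rw [hpop] at heq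
      exact absurd heq (by simp)

theorem loopPickB_eq (n : Nat) : ∀ (src : List Int) (acc : List Char) (i : Nat),
    (∀ x ∈ src, 0 ≤ x ∧ x ≤ 9) → i + n ≤ src.length → acc.length + n = 4 →
    loopPickB acc src (i : Int)
      = acc ++ ((src.drop i).take n).flatMap PySem.Int.toChars := by
  induction n with
  | zero =>
    intro src acc i hd hn hacc
    rw [loopPickB, if_neg (by omega)]
    simp
  | succ n ih =>
    intro src acc i hd hn hacc
    have hi : i < src.length := by omega
    have hget : PySem.List.pyGet? src (i : Int) = some src[i] := by
      rw [PySem.List.pyGet?_natCast]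
      exact List.getElem?_eq_getElem hi
    have hdig := hd src[i] (List.getElem_mem hi)
    rw [loopPickB, if_pos (by omega), hget]
    dsimp only
    have hdrop : src.drop i = src[i] :: src.drop (i + 1) := (List.getElem_cons_drop hi).symm
    rw [hdrop, List.take_succ_cons, List.flatMap_cons]
    rw [show ((i : Int) + 1) = (((i + 1 : Nat)) : Int) by omega]
    rw [ih src (acc ++ PySem.Int.toChars src[i]) (i + 1) hd (by omega)
      (by rw [List.length_append, toChars_len_one src[i] hdig.1 hdig.2]; omega)]
    rw [List.append_assoc]

-- ===== VERDICT (by name: the statement is the Claim_ definition above) =====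
theorem inputs_spec : Claim_equal_inputs := by
  intro num _ hpre
  simp only [Spec_inputs, inputs, inputs_alt]
  have hf := digits_facts num hpre
  rw [digitsOf_eq_map]
  rw [loopLargeA_eq 4 _ [] hf.1 hf.2 rfl, loopSmallA_eq 4 _ [] hf.1 hf.2 rfl]
  have hd_desc : ∀ x ∈ PySem.List.sorted ((PySem.Int.toChars num).map pyIntChar) (fun x => x) true,
      0 ≤ x ∧ x ≤ 9 := fun x hx => hf.1 x ((PySem.List.mem_sorted _ _ _ _).mp hx)
  have hd_asc : ∀ x ∈ PySem.List.sorted ((PySem.Int.toChars num).map pyIntChar) (fun x => x) false,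
      0 ≤ x ∧ x ≤ 9 := fun x hx => hf.1 x ((PySem.List.mem_sorted _ _ _ _).mp hx)
  rw [show (0 : Int) = ((0 : Nat) : Int) by rfl]
  rw [loopPickB_eq 4 _ [] 0 hd_desc (by rw [PySem.List.length_sorted]; omega) rfl,
    loopPickB_eq 4 _ [] 0 hd_asc (by rw [PySem.List.length_sorted]; omega) rfl]
  simp
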